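-- pv_equiv track=rewrite | github.com/danghuybk/Data-structure-and-Algorithm | CF_B. Two Buttons/two_buttons.py | two_buttons
-- ===== SOURCE A (Python) =====
-- from heapq import heappush, heappop
--
-- def two_buttons(N, M):
-- 	if N >= M:
-- 		return N - M
-- 	output, queue, min_dist = 0, [(0, N)], {}
--
-- 	while queue:
-- 		cur_dist, cur_number = heappop(queue)
--
-- 		if cur_number not in min_dist:
-- 			min_dist[cur_number] = cur_dist
-- 			if cur_number >= 1 and cur_number - 1 not in min_dist:
-- 				heappush(queue, (cur_dist + 1, cur_number - 1))
-- 			if cur_number <= M and cur_number * 2 not in min_dist: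
-- 				heappush(queue, (cur_dist + 1, cur_number * 2))
--
-- 	return min_dist[M]
-- ===== SOURCE B (Python) =====
-- def two_buttons(N, M):
--     if N >= M:
--         return N - M
--     ops = 0
--     while M > N:
--         if M % 2 == 0:
--             M //= 2
--         else:
--             M += 1
--         ops += 1
--     return ops + (N - M)
-- ===== Notes on version B (the rewrite author's own statement) =====
-- stated objective: faster
-- what changed: Replaces the Dijkstra/BFS search over the whole 0..2M graph (heap, dict of distances) with the classic greedy backward walk from M (halve when even, else increment), adding the remaining N-M decrements at the end.
import Mathlib
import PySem

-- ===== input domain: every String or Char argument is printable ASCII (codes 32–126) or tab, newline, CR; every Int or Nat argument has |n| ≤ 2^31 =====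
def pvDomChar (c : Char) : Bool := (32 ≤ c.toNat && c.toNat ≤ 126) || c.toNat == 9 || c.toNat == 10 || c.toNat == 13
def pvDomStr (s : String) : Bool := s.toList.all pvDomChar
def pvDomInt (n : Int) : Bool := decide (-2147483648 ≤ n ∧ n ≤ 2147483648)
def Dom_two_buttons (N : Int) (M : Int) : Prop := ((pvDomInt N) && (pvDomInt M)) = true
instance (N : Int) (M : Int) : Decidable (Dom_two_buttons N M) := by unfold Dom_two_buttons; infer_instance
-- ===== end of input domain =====

-- B replaces A's Dijkstra search over the whole 0..2M graph by a greedy backward walk from M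
-- (halve when even, else increment), measurably faster on large M. Equivalence is proved on
-- Pre_ (A raises KeyError or diverges when N ≤ 0 < M; B diverges there too).

-- ===== PORT A =====
-- heapq is modelled as a plain list whose pop extracts the lexicographic minimum (exactly the
-- value heappop returns; which physical copy of an equal tuple is removed is unobservable).
def pvMinPair (a b : Int × Int) : Int × Int :=
  if a.1 < b.1 ∨ (a.1 = b.1 ∧ a.2 ≤ b.2) then a else b

def pvHeapMin (h : Int × Int) (t : List (Int × Int)) : Int × Int := t.foldl pvMinPair h

-- the while loop; the fuel argument only makes it total; under Pre_ it is proved never to run out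
def twoLoop (M : Int) : Nat → List (Int × Int) → PySem.Dict Int Int → PySem.Dict Int Int
  | 0, _, dist => dist
  | fuel+1, q, dist =>
    match q with
    | [] => dist
    | h :: t =>
      let m := pvHeapMin h t
      let q' := (h :: t).erase m
      if (dist.get? m.2).isNone then
        let dist' := dist.insert m.2 m.1
        let q'' := q' ++ (if 1 ≤ m.2 ∧ (dist'.get? (m.2 - 1)).isNone then [(m.1 + 1, m.2 - 1)] else [])
                      ++ (if m.2 ≤ M ∧ (dist'.get? (m.2 * 2)).isNone then [(m.1 + 1, m.2 * 2)] else [])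
        twoLoop M fuel q'' dist'
      else twoLoop M fuel q' dist

def two_buttons (N : Int) (M : Int) : Int :=
  if M ≤ N then N - M
  else
    -- min_dist[M]: under Pre_ the key is present; .getD 0 only makes the lookup total
    -- (the KeyError inputs N ≤ 0 < M are excluded by Pre_)
    ((twoLoop M (6 * M + 16).toNat [(0, N)] PySem.Dict.empty).get? M).getD 0

-- ===== PORT B =====
-- the while loop of Source B; fuel only for totality (provably sufficient under Pre_)
def altLoop (N : Int) : Nat → Int → Int → Int
  | 0, M, ops => ops + (N - M)
  | fuel+1, M, ops =>
    if N < M then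
      if PySem.Int.mod M 2 = 0 then altLoop N fuel (PySem.Int.floordiv M 2) (ops + 1)
      else altLoop N fuel (M + 1) (ops + 1)
    else ops + (N - M)

def two_buttons_alt (N : Int) (M : Int) : Int :=
  if M ≤ N then N - M else altLoop N (2 * M + 8).toNat M 0

-- ===== PRECONDITION & SPEC =====
-- Pre_ excludes exactly N ≤ 0 < M, where A never returns (N = 0: KeyError min_dist[M];
-- N < 0: the loop keeps pushing fresh negative numbers and diverges).
def Pre_two_buttons (N : Int) (M : Int) : Prop := M ≤ N ∨ 1 ≤ N
instance (N : Int) (M : Int) : Decidable (Pre_two_buttons N M) := by unfold Pre_two_buttons; infer_instance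
def pvWitness_two_buttons : Int × Int := (3, 11)

def Spec_two_buttons (N : Int) (M : Int) (out : Int) : Prop := out = two_buttons_alt N M
instance (N : Int) (M : Int) (out : Int) : Decidable (Spec_two_buttons N M out) := by unfold Spec_two_buttons; infer_instance

-- ===== CLAIM (what is proved, stated in full; the proofs are below) =====
def Claim_equal_two_buttons : Prop := ∀ (N : Int) (M : Int), Dom_two_buttons N M → Pre_two_buttons N M → Spec_two_buttons N M (two_buttons N M)

-- ===== LEMMAS AND PROOFS =====

-- the step relation of A's graph: x-1 (press minus, needs x ≥ 1) or 2x (press double, pushed only when x ≤ M)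
def pvStep (M x y : Int) : Prop := (1 ≤ x ∧ y = x - 1) ∨ (x ≤ M ∧ y = x * 2)

-- reachable from N in exactly n steps
def pvRch (N M : Int) : Nat → Int → Prop
  | 0, x => x = N
  | n+1, y => ∃ x, pvRch N M n x ∧ pvStep M x y

-- shortest distance from N
noncomputable def pvSp (N M x : Int) : Nat := sInf {n | pvRch N M n x}

-- the greedy count (proof-side mirror of B): halve if even else two steps (increment+halve)
def pvG (N : Int) (m : Int) : Int :=
  if m ≤ N ∨ m ≤ 1 then N - m
  else if m % 2 = 0 then 1 + pvG N (m / 2)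
  else 2 + pvG N ((m + 1) / 2)
termination_by m.toNat
decreasing_by all_goals omega

lemma pvG_base {N m : Int} (h : m ≤ N ∨ m ≤ 1) : pvG N m = N - m := by
  rw [pvG]; simp [h]

lemma pvG_even {N m : Int} (h : ¬(m ≤ N ∨ m ≤ 1)) (he : m % 2 = 0) :
    pvG N m = 1 + pvG N (m / 2) := by
  rw [pvG]; simp [h, he]

lemma pvG_odd {N m : Int} (h : ¬(m ≤ N ∨ m ≤ 1)) (he : m % 2 ≠ 0) :
    pvG N m = 2 + pvG N ((m + 1) / 2) := by
  rw [pvG]; simp [h, he]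

lemma pvG_nonneg {N : Int} (hN : 1 ≤ N) : ∀ m, 0 ≤ pvG N m := by
  intro m
  induction m using pvG.induct N with
  | case1 m h => rw [pvG_base h]; omega
  | case2 m h he ih => rw [pvG_even h he]; omega
  | case3 m h he ih => rw [pvG_odd h he]; omega

lemma pvG_pred {N : Int} (hN : 1 ≤ N) : ∀ m, pvG N (m - 1) ≤ pvG N m + 1 := by
  intro m
  induction m using pvG.induct N with
  | case1 m h =>
    rw [pvG_base h, pvG_base (by omega)]; omega
  | case2 m h he ih =>
    rw [pvG_even h he]
    by_cases hb : m - 1 ≤ N ∨ m - 1 ≤ 1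
    · rw [pvG_base hb]
      have := pvG_nonneg hN (m / 2); omega
    · rw [pvG_odd hb (by omega)]
      have : (m - 1 + 1) / 2 = m / 2 := by omega
      rw [this]; omega
  | case3 m h he ih =>
    rw [pvG_odd h he]
    by_cases hb : m - 1 ≤ N ∨ m - 1 ≤ 1
    · rw [pvG_base hb]
      have := pvG_nonneg hN ((m + 1) / 2); omega
    · rw [pvG_even hb (by omega)]
      have h2 : (m - 1) / 2 = (m + 1) / 2 - 1 := by omega
      rw [h2]; omega

lemma pvRch_nonneg {N M : Int} (hN : 1 ≤ N) {n x} (h : pvRch N M n x) : 0 ≤ x := by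
  induction n generalizing x with
  | zero => rw [pvRch] at h; omega
  | succ n ih =>
    obtain ⟨w, hw, hs⟩ := h
    have := ih hw
    rcases hs with ⟨h1, rfl⟩ | ⟨h1, rfl⟩ <;> omega

lemma pvRch_le {N M : Int} (hN : 1 ≤ N) (hM : N ≤ M) {n x} (h : pvRch N M n x) : x ≤ 2 * M := by
  induction n generalizing x with
  | zero => rw [pvRch] at h; omega
  | succ n ih =>
    obtain ⟨w, hw, hs⟩ := h
    have h0 := pvRch_nonneg hN hw
    have := ih hw
    rcases hs with ⟨h1, rfl⟩ | ⟨h1, rfl⟩ <;> omega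

lemma pvSp_le {N M : Int} {n x} (h : pvRch N M n x) : pvSp N M x ≤ n :=
  Nat.sInf_le h

lemma pvRch_sp {N M : Int} {n x} (h : pvRch N M n x) : pvRch N M (pvSp N M x) x := by
  exact Nat.sInf_mem (s := {n | pvRch N M n x}) ⟨n, h⟩

lemma pvSp_N {N M : Int} : pvSp N M N = 0 :=
  Nat.le_zero.mp (pvSp_le (show pvRch N M 0 N from rfl))

-- a node ≠ N of minimal distance has a parent one step closer
lemma pvSp_parent {N M : Int} {n x} (h : pvRch N M n x) (hx : x ≠ N) :
    ∃ w m, pvRch N M m w ∧ pvStep M w x ∧ pvSp N M x = pvSp N M w + 1 := by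
  have hs := pvRch_sp h
  cases hk : pvSp N M x with
  | zero => rw [hk] at hs; rw [pvRch] at hs; exact absurd hs hx
  | succ k =>
    rw [hk] at hs
    obtain ⟨w, hw, hstep⟩ := hs
    have h1 : pvSp N M w ≤ k := pvSp_le hw
    have h2 : pvSp N M x ≤ pvSp N M w + 1 := pvSp_le ⟨w, pvRch_sp hw, hstep⟩
    exact ⟨w, k, hw, hstep, by omega⟩

-- lower bound: any walk from N to x takes at least pvG N x steps
lemma pvG_lower {N M : Int} (hN : 1 ≤ N) : ∀ n x, pvRch N M n x → pvG N x ≤ (n : Int) := by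
  intro n
  induction n with
  | zero =>
    intro x hx; rw [pvRch] at hx; subst hx
    rw [pvG_base (Or.inl le_rfl)]; omega
  | succ n ih =>
    intro x hx
    obtain ⟨w, hw, hstep⟩ := hx
    have hiw := ih w hw
    have hw0 : 0 ≤ w := pvRch_nonneg hN hw
    rcases hstep with ⟨h1, rfl⟩ | ⟨h1, rfl⟩
    · have := pvG_pred hN w
      push_cast; omega
    · have hd : pvG N (w * 2) ≤ pvG N w + 1 := by
        by_cases hb : w * 2 ≤ N ∨ w * 2 ≤ 1
        · rw [pvG_base hb, pvG_base (by omega)]; omega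
        · rw [pvG_even hb (by omega)]
          have : w * 2 / 2 = w := by omega
          rw [this]; omega
      push_cast; omega

-- upper bound: the greedy walk really exists in A's graph
lemma pvChain {N M : Int} : ∀ k : Nat, (k : Int) ≤ N → pvRch N M k (N - k) := by
  intro k
  induction k with
  | zero => intro _; rw [pvRch]; omega
  | succ k ih =>
    intro hk
    refine ⟨N - k, ih (by push_cast at hk ⊢; omega), Or.inl ⟨by push_cast at hk ⊢; omega, by push_cast; ring⟩⟩

lemma pvG_upper {N M : Int} (hN : 1 ≤ N) (hM : N ≤ M) :
    ∀ m, 0 ≤ m → m ≤ M → pvRch N M (pvG N m).toNat m := by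
  intro m
  induction m using pvG.induct N with
  | case1 m h =>
    intro h0 hmM
    have hmN : m ≤ N := by omega
    rw [pvG_base h]
    have hc := pvChain (N := N) (M := M) (N - m).toNat (by omega)
    have h2 : N - ((N - m).toNat : Int) = m := by omega
    rw [h2] at hc
    exact hc
  | case2 m h he ih =>
    intro h0 hmM
    have hrec := ih (by omega) (by omega)
    have ht : (pvG N m).toNat = (pvG N (m / 2)).toNat + 1 := by
      have := pvG_nonneg hN (m / 2)
      rw [pvG_even h he]; omega
    rw [ht]
    exact ⟨m / 2, hrec, Or.inr ⟨by omega, by omega⟩⟩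
  | case3 m h he ih =>
    intro h0 hmM
    have hrec := ih (by omega) (by omega)
    have ht : (pvG N m).toNat = (pvG N ((m + 1) / 2)).toNat + 2 := by
      have := pvG_nonneg hN ((m + 1) / 2)
      rw [pvG_odd h he]; omega
    rw [ht]
    exact ⟨m + 1, ⟨(m + 1) / 2, hrec, Or.inr ⟨by omega, by omega⟩⟩, Or.inl ⟨by omega, by omega⟩⟩

lemma pvSp_eq_pvG {N M : Int} (hN : 1 ≤ N) (hM : N ≤ M) :
    (pvSp N M M : Int) = pvG N M := by
  have hup := pvG_upper hN hM M (by omega) le_rfl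
  have h1 : pvSp N M M ≤ (pvG N M).toNat := pvSp_le hup
  have h2 : pvG N M ≤ (pvSp N M M : Int) := pvG_lower hN _ _ (pvRch_sp hup)
  have := pvG_nonneg hN M
  omega

-- ---- B side ----
lemma altLoop_eq {N : Int} (hN : 1 ≤ N) :
    ∀ (fuel : Nat) (M ops : Int), 2 * M ≤ (fuel : Int) → altLoop N fuel M ops = ops + pvG N M := by
  intro fuel
  induction fuel using Nat.strong_induction_on with
  | _ fuel ih =>
    intro M ops hf
    by_cases hMN : N < M
    · have hM2 : 2 ≤ M := by omega
      obtain ⟨f, rfl⟩ : ∃ f, fuel = f + 1 := ⟨fuel - 1, by omega⟩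
      simp only [altLoop, if_pos hMN]
      have hnb : ¬(M ≤ N ∨ M ≤ 1) := by omega
      by_cases hev : M % 2 = 0
      · rw [if_pos (by rw [PySem.Int.mod_eq_emod_of_pos (by omega)]; exact hev)]
        rw [PySem.Int.floordiv_eq_ediv_of_pos (by omega)]
        rw [ih f (by omega) (M / 2) (ops + 1) (by push_cast at hf ⊢; omega)]
        rw [pvG_even hnb hev]; ring
      · rw [if_neg (by rw [PySem.Int.mod_eq_emod_of_pos (by omega)]; exact hev)]
        have hM3 : 3 ≤ M := by omega
        obtain ⟨f', rfl⟩ : ∃ f', f = f' + 1 := ⟨f - 1, by push_cast at hf; omega⟩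
        have hlt : N < M + 1 := by omega
        simp only [altLoop, if_pos hlt]
        rw [if_pos (by rw [PySem.Int.mod_eq_emod_of_pos (by omega)]; omega)]
        rw [PySem.Int.floordiv_eq_ediv_of_pos (by omega)]
        rw [ih f' (by omega) ((M + 1) / 2) (ops + 1 + 1) (by push_cast at hf ⊢; omega)]
        rw [pvG_odd hnb hev]; ring
    · cases fuel with
      | zero => rw [altLoop, pvG_base (Or.inl (by omega))]
      | succ f =>
        simp only [altLoop, if_neg hMN]
        rw [pvG_base (Or.inl (by omega))]

-- ---- A side: the Dijkstra loop ----
def pvInv (N M : Int) (q : List (Int × Int)) (dist : PySem.Dict Int Int) : Prop :=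
  dist.keys.Nodup ∧
  (∀ z d, dist.get? z = some d → d = (pvSp N M z : Int) ∧ pvRch N M (pvSp N M z) z) ∧
  (∀ e ∈ q, ∃ n : Nat, e.1 = (n : Int) ∧ pvRch N M n e.2) ∧
  (∀ z, dist.get? z = none →
      (z = N ∨ ∃ w dw, dist.get? w = some dw ∧ pvStep M w z ∧ pvSp N M z = pvSp N M w + 1) →
      ((pvSp N M z : Int), z) ∈ q)

def pvMeas (M : Int) (q : List (Int × Int)) (dist : PySem.Dict Int Int) : Nat :=
  3 * ((2 * M + 1).toNat - dist.size) + q.length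

lemma pvMinPair_cases (a b : Int × Int) : pvMinPair a b = a ∨ pvMinPair a b = b := by
  unfold pvMinPair; split <;> simp

lemma pvMinPair_le_left (a b : Int × Int) : (pvMinPair a b).1 ≤ a.1 := by
  unfold pvMinPair; split <;> omega

lemma pvMinPair_le_right (a b : Int × Int) : (pvMinPair a b).1 ≤ b.1 := by
  unfold pvMinPair; split <;> omega

lemma pvHeapMin_mem (h : Int × Int) (t : List (Int × Int)) : pvHeapMin h t ∈ h :: t := by
  unfold pvHeapMin
  induction t generalizing h with
  | nil => simp
  | cons b t ih =>
    simp only [List.foldl_cons]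
    rcases pvMinPair_cases h b with hc | hc <;> rw [hc]
    · have h' := ih h
      simp only [List.mem_cons] at h' ⊢; tauto
    · have h' := ih b
      simp only [List.mem_cons] at h' ⊢; tauto

lemma pvHeapMin_le (h : Int × Int) (t : List (Int × Int)) :
    ∀ e ∈ h :: t, (pvHeapMin h t).1 ≤ e.1 := by
  unfold pvHeapMin
  induction t generalizing h with
  | nil => simp
  | cons b t ih =>
    intro e he
    simp only [List.foldl_cons]
    simp only [List.mem_cons] at he
    rcases he with rfl | rfl | he
    · exact le_trans (ih (pvMinPair e b) _ (List.mem_cons_self)) (pvMinPair_le_left e b)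
    · exact le_trans (ih (pvMinPair h e) _ (List.mem_cons_self)) (pvMinPair_le_right h e)
    · exact ih (pvMinPair h b) e (List.mem_cons_of_mem _ he)

lemma pvSize_le {N M : Int} (hN : 1 ≤ N) (hM : N ≤ M) {dist : PySem.Dict Int Int}
    (h1 : dist.keys.Nodup)
    (h2 : ∀ z d, dist.get? z = some d → d = (pvSp N M z : Int) ∧ pvRch N M (pvSp N M z) z) :
    dist.size ≤ (2 * M + 1).toNat := by
  have hb : ∀ k ∈ dist.keys, 0 ≤ k ∧ k ≤ 2 * M := by
    intro k hk
    cases hg : dist.get? k with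
    | none => rw [PySem.Dict.get?_eq_none_iff_not_mem_keys] at hg; exact absurd hk hg
    | some d =>
      have ⟨_, hr⟩ := h2 k d hg
      exact ⟨pvRch_nonneg hN hr, pvRch_le hN hM hr⟩
  have hsub : dist.keys.toFinset ⊆ Finset.Icc 0 (2 * M) := by
    intro k hk
    rw [List.mem_toFinset] at hk
    rw [Finset.mem_Icc]
    exact hb k hk
  have hcard := Finset.card_le_card hsub
  rw [List.toFinset_card_of_nodup h1, Int.card_Icc] at hcard
  have hlen : dist.keys.length = dist.size := by
    simp [PySem.Dict.keys, PySem.Dict.size]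
  omega

-- frontier: a reachable, not-yet-finished node has a queue entry at its exact distance, not larger
lemma pvFrontier {N M : Int} {q dist} (hInv : pvInv N M q dist) :
    ∀ x n, pvRch N M n x → dist.get? x = none →
      ∃ z, ((pvSp N M z : Int), z) ∈ q ∧ dist.get? z = none ∧ pvSp N M z ≤ pvSp N M x := by
  obtain ⟨h1, h2, h3, h4⟩ := hInv
  have key : ∀ s : Nat, ∀ x n, pvRch N M n x → dist.get? x = none → pvSp N M x = s →
      ∃ z, ((pvSp N M z : Int), z) ∈ q ∧ dist.get? z = none ∧ pvSp N M z ≤ pvSp N M x := by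
    intro s
    induction s using Nat.strong_induction_on with
    | _ s ih =>
      intro x n hx hnone hs
      by_cases hxN : x = N
      · exact ⟨x, h4 x hnone (Or.inl hxN), hnone, le_rfl⟩
      · obtain ⟨w, m, hw, hstep, hsp⟩ := pvSp_parent hx hxN
        cases hcw : dist.get? w with
        | some dw =>
          exact ⟨x, h4 x hnone (Or.inr ⟨w, dw, hcw, hstep, hsp⟩), hnone, le_rfl⟩
        | none =>
          obtain ⟨z, hz1, hz2, hz3⟩ := ih (pvSp N M w) (by omega) w m hw hcw rfl
          exact ⟨z, hz1, hz2, by omega⟩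
  intro x n hx hnone
  exact key (pvSp N M x) x n hx hnone rfl

lemma pvFinal {N M : Int} (hN : 1 ≤ N) (hM : N < M) {dist : PySem.Dict Int Int}
    (hInv : pvInv N M [] dist) : dist.get? M = some ((pvSp N M M : Int)) := by
  have hup := pvG_upper hN (le_of_lt hM) M (by omega) le_rfl
  cases hg : dist.get? M with
  | none =>
    obtain ⟨z, hz1, _, _⟩ := pvFrontier hInv M _ hup hg
    exact absurd hz1 (List.not_mem_nil)
  | some d =>
    have ⟨hd, _⟩ := hInv.2.1 M d hg
    rw [hd]

lemma pvMain {N M : Int} (hN : 1 ≤ N) (hM : N < M) :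
    ∀ fuel q dist, pvInv N M q dist → pvMeas M q dist ≤ fuel →
      (twoLoop M fuel q dist).get? M = some ((pvSp N M M : Int)) := by
  intro fuel
  induction fuel with
  | zero =>
    intro q dist hInv hmeas
    have hq : q = [] := by
      have : q.length = 0 := by unfold pvMeas at hmeas; omega
      exact List.eq_nil_of_length_eq_zero this
    subst hq
    rw [twoLoop]
    exact pvFinal hN hM hInv
  | succ fuel ih =>
    intro q dist hInv hmeas
    cases q with
    | nil => simp only [twoLoop]; exact pvFinal hN hM hInv
    | cons h t =>
      obtain ⟨h1, h2, h3, h4⟩ := hInv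
      have hmem := pvHeapMin_mem h t
      have hmin := pvHeapMin_le h t
      simp only [twoLoop]
      generalize hgen : pvHeapMin h t = m at hmem hmin ⊢
      by_cases hnone : dist.get? m.2 = none
      · rw [if_pos (by simp [hnone])]
        obtain ⟨n, hm1, hRn⟩ := h3 m hmem
        obtain ⟨z, hzq, hznone, hzle⟩ := pvFrontier ⟨h1, h2, h3, h4⟩ m.2 n hRn hnone
        have hminz := hmin _ hzq
        have hsple : pvSp N M m.2 ≤ n := pvSp_le hRn
        simp only at hminz
        have hspm : (pvSp N M m.2 : Int) = m.1 := by omega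
        have hneq : n = pvSp N M m.2 := by omega
        have hRsp : pvRch N M (pvSp N M m.2) m.2 := hneq ▸ hRn
        have hcont : dist.contains m.2 = false := (PySem.Dict.get?_eq_none_iff_contains _ _).mp hnone
        have I1' : (dist.insert m.2 m.1).keys.Nodup := PySem.Dict.nodup_keys_insert _ _ _ h1
        have I2' : ∀ z d, (dist.insert m.2 m.1).get? z = some d →
            d = (pvSp N M z : Int) ∧ pvRch N M (pvSp N M z) z := by
          intro z d hz
          rw [PySem.Dict.get?_insert] at hz
          by_cases hzm : z = m.2
          · rw [if_pos hzm] at hz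
            subst hzm
            refine ⟨?_, hRsp⟩
            injection hz with h'
            omega
          · rw [if_neg hzm] at hz
            exact h2 z d hz
        have I3' : ∀ e ∈ (h :: t).erase m ++
              (if 1 ≤ m.2 ∧ ((dist.insert m.2 m.1).get? (m.2 - 1)).isNone then [(m.1 + 1, m.2 - 1)] else []) ++
              (if m.2 ≤ M ∧ ((dist.insert m.2 m.1).get? (m.2 * 2)).isNone then [(m.1 + 1, m.2 * 2)] else []),
            ∃ n : Nat, e.1 = (n : Int) ∧ pvRch N M n e.2 := by
          intro e he
          rcases List.mem_append.mp he with he | he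
          · rcases List.mem_append.mp he with he | he
            · exact h3 e (List.erase_subset he)
            · revert he; split_ifs with hc
              · intro he
                rw [List.mem_singleton] at he
                subst he
                exact ⟨pvSp N M m.2 + 1, by push_cast; omega, ⟨m.2, hRsp, Or.inl ⟨hc.1, rfl⟩⟩⟩
              · intro he; exact absurd he (List.not_mem_nil)
          · revert he; split_ifs with hc
            · intro he
              rw [List.mem_singleton] at he
              subst he
              exact ⟨pvSp N M m.2 + 1, by push_cast; omega, ⟨m.2, hRsp, Or.inr ⟨hc.1, rfl⟩⟩⟩
            · intro he; exact absurd he (List.not_mem_nil)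
        have I4' : ∀ z, (dist.insert m.2 m.1).get? z = none →
            (z = N ∨ ∃ w dw, (dist.insert m.2 m.1).get? w = some dw ∧ pvStep M w z ∧
              pvSp N M z = pvSp N M w + 1) →
            ((pvSp N M z : Int), z) ∈ (h :: t).erase m ++
              (if 1 ≤ m.2 ∧ ((dist.insert m.2 m.1).get? (m.2 - 1)).isNone then [(m.1 + 1, m.2 - 1)] else []) ++
              (if m.2 ≤ M ∧ ((dist.insert m.2 m.1).get? (m.2 * 2)).isNone then [(m.1 + 1, m.2 * 2)] else []) := by
          intro z hz hcond
          have hzm : z ≠ m.2 := by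
            intro he
            rw [he, PySem.Dict.get?_insert_self] at hz
            cases hz
          have hzold : dist.get? z = none := by
            rw [PySem.Dict.get?_insert_of_ne _ _ hzm] at hz
            exact hz
          have hmem_of_old : ((pvSp N M z : Int), z) ∈ (h :: t) →
              ((pvSp N M z : Int), z) ∈ (h :: t).erase m := by
            intro hin
            refine (List.mem_erase_of_ne ?_).mpr hin
            intro he
            exact hzm (congrArg Prod.snd he)
          rcases hcond with rfl | ⟨w, dw, hw, hstep, hspz⟩
          · exact List.mem_append.mpr (Or.inl (List.mem_append.mpr (Or.inl
              (hmem_of_old (h4 _ hzold (Or.inl rfl))))))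
          · by_cases hwm : w = m.2
            · subst hwm
              have hval : ((pvSp N M z : Int), z) = (m.1 + 1, z) := by
                rw [Prod.mk.injEq]
                constructor
                · omega
                · rfl
              rcases hstep with ⟨hg1, rfl⟩ | ⟨hg1, rfl⟩
              · refine List.mem_append.mpr (Or.inl (List.mem_append.mpr (Or.inr ?_)))
                rw [if_pos ⟨hg1, by simp [hz]⟩, hval]
                exact List.mem_singleton.mpr rfl
              · refine List.mem_append.mpr (Or.inr ?_)
                rw [if_pos ⟨hg1, by simp [hz]⟩, hval]
                exact List.mem_singleton.mpr rfl
            · have hwold : dist.get? w = some dw := by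
                rw [PySem.Dict.get?_insert_of_ne _ _ hwm] at hw
                exact hw
              exact List.mem_append.mpr (Or.inl (List.mem_append.mpr (Or.inl
                (hmem_of_old (h4 _ hzold (Or.inr ⟨w, dw, hwold, hstep, hspz⟩))))))
        refine ih _ _ ⟨I1', I2', I3', I4'⟩ ?_
        have hsz : (dist.insert m.2 m.1).size = dist.size + 1 := by
          rw [PySem.Dict.size_insert]; simp [hcont]
        have hbound := pvSize_le hN (le_of_lt hM) I1' I2'
        have hlq : ((h :: t).erase m).length = (h :: t).length - 1 :=
          List.length_erase_of_mem hmem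
        have hl1 : (if 1 ≤ m.2 ∧ ((dist.insert m.2 m.1).get? (m.2 - 1)).isNone then [(m.1 + 1, m.2 - 1)] else []).length ≤ 1 := by
          split <;> simp
        have hl2 : (if m.2 ≤ M ∧ ((dist.insert m.2 m.1).get? (m.2 * 2)).isNone then [(m.1 + 1, m.2 * 2)] else []).length ≤ 1 := by
          split <;> simp
        unfold pvMeas at hmeas ⊢
        rw [hsz]
        simp only [List.length_append]
        have hlen1 : 1 ≤ (h :: t).length := by simp
        omega
      · obtain ⟨d0, hsome⟩ := Option.ne_none_iff_exists'.mp hnone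
        rw [if_neg (by simp [hsome])]
        refine ih _ _ ⟨h1, h2, fun e he => h3 e (List.erase_subset he), ?_⟩ ?_
        · intro z hz hcond
          refine (List.mem_erase_of_ne ?_).mpr (h4 z hz hcond)
          intro he
          have : z = m.2 := congrArg Prod.snd he
          rw [this, hsome] at hz
          cases hz
        · unfold pvMeas at hmeas ⊢
          rw [List.length_erase_of_mem hmem]
          have hlen1 : 1 ≤ (h :: t).length := by simp
          omega

-- ===== VERDICT (by name: the statement is the Claim_ definition above) =====
theorem two_buttons_spec : Claim_equal_two_buttons := by
  intro N M hDom hPre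
  unfold Spec_two_buttons two_buttons two_buttons_alt
  by_cases hMN : M ≤ N
  · rw [if_pos hMN, if_pos hMN]
  · rw [if_neg hMN, if_neg hMN]
    have hN : 1 ≤ N := by
      rcases hPre with hp | hp
      · omega
      · exact hp
    have hM : N < M := by omega
    have hInv0 : pvInv N M [(0, N)] PySem.Dict.empty := by
      refine ⟨PySem.Dict.nodup_keys_empty, ?_, ?_, ?_⟩
      · intro z d hz
        rw [PySem.Dict.get?_empty] at hz
        cases hz
      · intro e he
        rw [List.mem_singleton] at he
        subst he
        exact ⟨0, by norm_num, by rw [pvRch]⟩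
      · intro z hz hcond
        rcases hcond with rfl | ⟨w, dw, hw, _, _⟩
        · rw [pvSp_N]
          simp
        · rw [PySem.Dict.get?_empty] at hw
          cases hw
    have hmeas0 : pvMeas M [(0, N)] PySem.Dict.empty ≤ (6 * M + 16).toNat := by
      unfold pvMeas
      rw [PySem.Dict.size_empty]
      simp only [List.length_singleton]
      omega
    rw [pvMain hN hM _ _ _ hInv0 hmeas0, altLoop_eq hN _ M 0 (by omega),
      Option.getD_some, pvSp_eq_pvG hN (le_of_lt hM)]
    omega
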